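-- pv_equiv track=rewrite | github.com/981377660LMT/algorithm-study | 19_数学/计算几何/直线/practice/C - Triangle-平面上 n 点组成多少个三角形.py | solve
-- ===== SOURCE A (Python) =====
-- from collections import defaultdict
-- from math import comb, gcd
-- from typing import List, Tuple
--
-- INF = int(1e20)
--
-- def calSlope1(x1: int, y1: int, x2: int, y2: int) -> Tuple[int, int]:
--     """直线斜率"""
--     if x2 == x1:
--         return (INF, INF)
--     gcd_ = gcd(x2 - x1, y2 - y1)
--     a, b = (y2 - y1) // gcd_, (x2 - x1) // gcd_
--     if a == 0:
--         return (0, b if b > 0 else -b)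
--     elif a < 0:
--         return (-a, -b)
--     else:
--         return (a, b)
--
-- def solve(points: List[Tuple[int, int]]) -> int:
--     """平面上n点组成多少个三角形 O(n^2)"""
--     n = len(points)
--     res = 0  # 三点共线的对数
--     for i in range(n):
--         x1, y1 = points[i]
--         slopeCounter = defaultdict(int)
--         for j in range(i + 1, n):
--             x2, y2 = points[j]
--             slope = calSlope1(x1, y1, x2, y2)
--             slopeCounter[slope] += 1
--
--         for count in slopeCounter.values():
--             res += comb(count, 2)
--
--     return comb(n, 3) - res
-- ===== SOURCE B (Python) =====
-- def solve(points):
--     """Count triples of points that form a (proper) triangle, by direct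
--     enumeration: two later points make a triangle with the first unless they
--     have the same slope seen from it (verticals compare equal)."""
--     n = len(points)
--     res = 0
--     for i in range(n):
--         x1, y1 = points[i]
--         for j in range(i + 1, n):
--             x2, y2 = points[j]
--             for k in range(j + 1, n):
--                 x3, y3 = points[k]
--                 if x1 == x2 or x1 == x3:
--                     same = x1 == x2 and x1 == x3
--                 else:
--                     same = (y2 - y1) * (x3 - x1) == (y3 - y1) * (x2 - x1)
--                 if not same:
--                     res += 1
--     return res
-- ===== Notes on version B (the rewrite author's own statement) =====
-- stated objective: simpler
-- what changed: Replaced the per-anchor hash-map of gcd-normalized slope keys with comb(count,2)/comb(n,3) arithmetic by a direct enumeration of all triples that counts triangles positively with a plain integer cross-product slope-equality test (verticals compared separately) - no gcd, no dict, no comb, at the cost of O(n^3) vs A's O(n^2).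
import Mathlib
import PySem

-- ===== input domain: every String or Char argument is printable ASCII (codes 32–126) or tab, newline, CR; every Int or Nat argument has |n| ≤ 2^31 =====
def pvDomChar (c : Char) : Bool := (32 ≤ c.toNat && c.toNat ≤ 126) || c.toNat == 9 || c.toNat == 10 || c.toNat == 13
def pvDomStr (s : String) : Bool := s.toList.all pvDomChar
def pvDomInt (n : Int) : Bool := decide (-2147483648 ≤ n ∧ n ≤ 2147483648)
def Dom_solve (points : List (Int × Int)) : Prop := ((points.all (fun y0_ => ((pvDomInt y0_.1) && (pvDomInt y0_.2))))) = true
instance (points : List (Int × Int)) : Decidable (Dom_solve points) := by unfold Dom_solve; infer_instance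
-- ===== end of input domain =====

-- B replaces A's per-anchor gcd-normalized slope hashing (and the comb(n,3)-minus-collinear
-- arithmetic) by a plain enumeration of all triples with an integer cross-product
-- slope-equality test: simpler (no gcd/dict/comb), at the cost of O(n^3) vs A's O(n^2).

-- ===== PORT A =====
def pvINF : Int := 10 ^ 20   -- int(1e20) == 10**20 exactly

-- math.comb; in this program it is only applied to nonnegative arguments
def pyComb (n k : Int) : Int := (Nat.choose n.toNat k.toNat : Int)

def calSlope1 (x1 y1 x2 y2 : Int) : Int × Int :=
  if x2 == x1 then (pvINF, pvINF)
  else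
    let g : Int := (Int.gcd (x2 - x1) (y2 - y1) : Int)   -- math.gcd (nonnegative)
    let a : Int := PySem.Int.floordiv (y2 - y1) g
    let b : Int := PySem.Int.floordiv (x2 - x1) g
    if a == 0 then (0, if b > 0 then b else -b)
    else if a < 0 then (-a, -b)
    else (a, b)

-- the body of A's outer iteration for anchor (x1, y1) over the points after it:
-- build the slope counter (defaultdict(int)), then add comb(count, 2) for its values
def anchorRes (x1 y1 : Int) (rest : List (Int × Int)) : Int :=
  let slopeCounter : PySem.Dict (Int × Int) Int :=
    rest.foldl (fun d p => d.modify (calSlope1 x1 y1 p.1 p.2) 0 (· + 1)) PySem.Dict.empty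
  slopeCounter.values.foldl (fun r c => r + pyComb c 2) 0

def solveLoop : List (Int × Int) → Int
  | [] => 0
  | p :: rest => anchorRes p.1 p.2 rest + solveLoop rest

def solve (points : List (Int × Int)) : Int :=
  pyComb (points.length : Int) 3 - solveLoop points

-- ===== PORT B =====
def sameSlopeB (x1 y1 x2 y2 x3 y3 : Int) : Bool :=
  if x1 == x2 || x1 == x3 then x1 == x2 && x1 == x3
  else (y2 - y1) * (x3 - x1) == (y3 - y1) * (x2 - x1)

def innerK (x1 y1 x2 y2 : Int) : List (Int × Int) → Int
  | [] => 0
  | r :: t => (if sameSlopeB x1 y1 x2 y2 r.1 r.2 then 0 else 1) + innerK x1 y1 x2 y2 t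

def innerJ (x1 y1 : Int) : List (Int × Int) → Int
  | [] => 0
  | q :: t => innerK x1 y1 q.1 q.2 t + innerJ x1 y1 t

def solve_alt (points : List (Int × Int)) : Int :=
  match points with
  | [] => 0
  | p :: t => innerJ p.1 p.2 t + solve_alt t

-- ===== PRECONDITION & SPEC =====
def Spec_solve (points : List (Int × Int)) (out : Int) : Prop := out = solve_alt points
instance (points : List (Int × Int)) (out : Int) : Decidable (Spec_solve points out) := by unfold Spec_solve; infer_instance

-- ===== CLAIM (what is proved, stated in full; the proofs are below) =====
def Claim_equal_solve : Prop := ∀ (points : List (Int × Int)), Dom_solve points → Spec_solve points (solve points)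



-- ===== LEMMAS AND PROOFS =====

-- proof-side counters: number of (ordered-position) pairs / triples, and equal-slope pairs
def pairsTot {a : Type} : List a → Int
  | [] => 0
  | _ :: t => (t.length : Int) + pairsTot t

def tripsTot {a : Type} : List a → Int
  | [] => 0
  | _ :: t => pairsTot t + tripsTot t

-- pairs of equal elements (j < k) in a list
def eqS : List (Int × Int) → Int
  | [] => 0
  | s :: t => (t.count s : Int) + eqS t

-- pairs of points after anchor (x1,y1) with equal calSlope1
def eqA (x1 y1 : Int) : List (Int × Int) → Int
  | [] => 0
  | q :: t => (t.countP (fun r => calSlope1 x1 y1 r.1 r.2 == calSlope1 x1 y1 q.1 q.2) : Int) + eqA x1 y1 t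

theorem pyComb_natCast (c k : Nat) : pyComb (c : Int) (k : Int) = (Nat.choose c k : Int) := by
  simp [pyComb]

theorem comb2_eq {a : Type} (l : List a) : pyComb (l.length : Int) 2 = pairsTot l := by
  induction l with
  | nil => simp [pairsTot, pyComb]
  | cons x t ih =>
    have h2 : ((2:Int)) = ((2:Nat) : Int) := by norm_num
    simp only [pairsTot, List.length_cons, ← ih]
    rw [h2, pyComb_natCast, pyComb_natCast]
    push_cast [Nat.choose_succ_succ, Nat.choose_one_right]
    ring

theorem comb3_eq {a : Type} (l : List a) : pyComb (l.length : Int) 3 = tripsTot l := by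
  induction l with
  | nil => simp [tripsTot, pyComb]
  | cons x t ih =>
    have h3 : ((3:Int)) = ((3:Nat) : Int) := by norm_num
    simp only [tripsTot, List.length_cons, ← ih, ← comb2_eq]
    have h2 : ((2:Int)) = ((2:Nat) : Int) := by norm_num
    rw [h3, h2, pyComb_natCast, pyComb_natCast, pyComb_natCast]
    push_cast [Nat.choose_succ_succ (n := t.length) (k := 2)]
    ring

-- decomposition of calSlope1 in the non-vertical case
theorem slope_decomp (x1 y1 x2 y2 : Int) (h : x2 ≠ x1) :
    ∃ a b g : Int, 0 < g ∧ (y2 - y1) = a * g ∧ (x2 - x1) = b * g ∧ Int.gcd a b = 1 ∧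
      calSlope1 x1 y1 x2 y2 =
        (if a = 0 then ((0:Int), if b > 0 then b else -b) else if a < 0 then (-a, -b) else (a, b)) := by
  have hdx : x2 - x1 ≠ 0 := sub_ne_zero.mpr h
  have hgne : Int.gcd (x2 - x1) (y2 - y1) ≠ 0 := by
    simp [Int.gcd_eq_zero_iff, hdx]
  have hgposN : 0 < Int.gcd (x2 - x1) (y2 - y1) := Nat.pos_of_ne_zero hgne
  have hgpos : (0:Int) < (Int.gcd (x2 - x1) (y2 - y1) : Int) := by exact_mod_cast hgposN
  have hdvdx : ((Int.gcd (x2 - x1) (y2 - y1) : Int)) ∣ (x2 - x1) := Int.gcd_dvd_left _ _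
  have hdvdy : ((Int.gcd (x2 - x1) (y2 - y1) : Int)) ∣ (y2 - y1) := Int.gcd_dvd_right _ _
  refine ⟨(y2 - y1) / (Int.gcd (x2 - x1) (y2 - y1) : Int),
         (x2 - x1) / (Int.gcd (x2 - x1) (y2 - y1) : Int),
         (Int.gcd (x2 - x1) (y2 - y1) : Int), hgpos, ?_, ?_, ?_, ?_⟩
  · exact (Int.ediv_mul_cancel hdvdy).symm
  · exact (Int.ediv_mul_cancel hdvdx).symm
  · rw [Int.gcd_comm]
    exact Int.gcd_div_gcd_div_gcd (i := x2 - x1) (j := y2 - y1) hgposN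
  · unfold calSlope1
    rw [if_neg (by simpa using fun hc : x2 = x1 => h hc)]
    simp only [beq_iff_eq, PySem.Int.floordiv_eq_ediv_of_pos hgpos]

-- a non-vertical slope is never the (INF, INF) sentinel
theorem slope_ne_INF (x1 y1 x2 y2 : Int) (h : x2 ≠ x1) :
    calSlope1 x1 y1 x2 y2 ≠ (pvINF, pvINF) := by
  obtain ⟨a, b, g, hg, hy, hx, hcop, heq⟩ := slope_decomp x1 y1 x2 y2 h
  rw [heq]
  split_ifs with h1 h2 <;> intro hc <;> rw [Prod.mk.injEq] at hc <;>
    obtain ⟨ha, hb⟩ := hc <;>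
    (have hab : a = b := by omega
     have hone : b.natAbs = 1 := by simpa [Int.gcd, hab, Nat.gcd_self] using hcop
     have hcon : pvINF = 1 ∨ pvINF = -1 := by omega
     norm_num [pvINF] at hcon)

-- the sign-normalised reduced pair is equal iff the cross product vanishes
theorem norm_eq_iff (a2 b2 a3 b3 : Int) (hb2 : b2 ≠ 0) (hb3 : b3 ≠ 0)
    (hc2 : Int.gcd a2 b2 = 1) (hc3 : Int.gcd a3 b3 = 1) :
    ((if a2 = 0 then ((0:Int), if b2 > 0 then b2 else -b2) else if a2 < 0 then (-a2, -b2) else (a2, b2)) =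
     (if a3 = 0 then ((0:Int), if b3 > 0 then b3 else -b3) else if a3 < 0 then (-a3, -b3) else (a3, b3)))
    ↔ a2 * b3 = a3 * b2 := by
  constructor
  · intro hEq
    by_cases ha2 : a2 = 0 <;> by_cases ha3 : a3 = 0
    · rw [ha2, ha3]; ring
    · rw [if_pos ha2, if_neg ha3] at hEq
      split_ifs at hEq <;> (rw [Prod.mk.injEq] at hEq; omega)
    · rw [if_neg ha2, if_pos ha3] at hEq
      split_ifs at hEq <;> (rw [Prod.mk.injEq] at hEq; omega)
    · rw [if_neg ha2, if_neg ha3] at hEq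
      split_ifs at hEq <;> rw [Prod.mk.injEq] at hEq <;>
        (obtain ⟨e1, e2⟩ := hEq
         have hcase : (a2 = a3 ∧ b2 = b3) ∨ (a2 = -a3 ∧ b2 = -b3) := by omega
         rcases hcase with ⟨u, v⟩ | ⟨u, v⟩ <;> (rw [u, v]; try ring))
  · intro hcross
    by_cases ha2 : a2 = 0
    · have ha3 : a3 = 0 := by
        rcases mul_eq_zero.mp (show a3 * b2 = 0 by rw [← hcross, ha2, zero_mul]) with h | h
        · exact h
        · exact absurd h hb2
      have hb2' : b2.natAbs = 1 := by simpa [ha2, Int.gcd] using hc2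
      have hb3' : b3.natAbs = 1 := by simpa [ha3, Int.gcd] using hc3
      have hb2'' : b2 = 1 ∨ b2 = -1 := by omega
      have hb3'' : b3 = 1 ∨ b3 = -1 := by omega
      rw [if_pos ha2, if_pos ha3]
      rcases hb2'' with h | h <;> rcases hb3'' with h' | h' <;> rw [h, h'] <;> norm_num
    · have ha3 : a3 ≠ 0 := by
        intro h0
        rw [h0, zero_mul] at hcross
        rcases mul_eq_zero.mp hcross with h | h
        · exact ha2 h
        · exact hb3 h
      have hco2 : IsCoprime a2 b2 := Int.isCoprime_iff_gcd_eq_one.mpr hc2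
      have hco3 : IsCoprime a3 b3 := Int.isCoprime_iff_gcd_eq_one.mpr hc3
      have hd23 : a2 ∣ a3 := hco2.dvd_of_dvd_mul_right ⟨b3, hcross.symm⟩
      have hd32 : a3 ∣ a2 := hco3.dvd_of_dvd_mul_right ⟨b2, hcross⟩
      have habsEq : a2.natAbs = a3.natAbs :=
        Nat.dvd_antisymm (Int.natAbs_dvd_natAbs.mpr hd23) (Int.natAbs_dvd_natAbs.mpr hd32)
      have habs : a2 = a3 ∨ a2 = -a3 := by omega
      rw [if_neg ha2, if_neg ha3]
      rcases habs with hA | hA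
      · have hB : b3 = b2 := mul_left_cancel₀ ha3 (by rw [← hcross, hA])
        split_ifs <;> rw [Prod.mk.injEq] <;> exact ⟨by omega, by omega⟩
      · have hB : b3 = -b2 := by
          have h' : a3 * (-b3) = a3 * b2 := by rw [← hcross, hA]; ring
          have := mul_left_cancel₀ ha3 h'
          omega
        split_ifs <;> rw [Prod.mk.injEq] <;> exact ⟨by omega, by omega⟩

-- cross product transfers through the gcd decomposition
theorem cross_transfer (a2 b2 a3 b3 g2 g3 dy2 dx2 dy3 dx3 : Int)
    (hg2 : 0 < g2) (hg3 : 0 < g3)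
    (hy2 : dy2 = a2 * g2) (hx2 : dx2 = b2 * g2)
    (hy3 : dy3 = a3 * g3) (hx3 : dx3 = b3 * g3) :
    (dy2 * dx3 = dy3 * dx2) ↔ a2 * b3 = a3 * b2 := by
  subst hy2 hx2 hy3 hx3
  constructor
  · intro h
    have hgg : g2 * g3 ≠ 0 := by positivity
    have h' : (a2 * b3) * (g2 * g3) = (a3 * b2) * (g2 * g3) := by ring_nf; ring_nf at h; linarith
    exact mul_right_cancel₀ hgg h'
  · intro h
    calc a2 * g2 * (b3 * g3) = (a2 * b3) * (g2 * g3) := by ring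
    _ = (a3 * b2) * (g2 * g3) := by rw [h]
    _ = a3 * g3 * (b2 * g2) := by ring

-- KEY LEMMA: B's boolean test is exactly equality of A's canonical slopes
theorem sameSlopeB_iff (x1 y1 x2 y2 x3 y3 : Int) :
    sameSlopeB x1 y1 x2 y2 x3 y3 = true ↔
      calSlope1 x1 y1 x2 y2 = calSlope1 x1 y1 x3 y3 := by
  by_cases h2 : x2 = x1 <;> by_cases h3 : x3 = x1
  · unfold sameSlopeB calSlope1
    simp [h2, h3]
  · unfold sameSlopeB
    rw [if_pos (by simp [h2])]
    have hne := slope_ne_INF x1 y1 x3 y3 h3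
    have hv : calSlope1 x1 y1 x2 y2 = (pvINF, pvINF) := by
      unfold calSlope1; rw [if_pos (by simp [h2])]
    rw [hv]
    constructor
    · intro hb
      simp only [Bool.and_eq_true, beq_iff_eq] at hb
      exact absurd hb.2.symm h3
    · intro hc
      exact absurd hc.symm hne
  · unfold sameSlopeB
    rw [if_pos (by simp [h3])]
    have hne := slope_ne_INF x1 y1 x2 y2 h2
    have hv : calSlope1 x1 y1 x3 y3 = (pvINF, pvINF) := by
      unfold calSlope1; rw [if_pos (by simp [h3])]
    rw [hv]
    constructor
    · intro hb
      simp only [Bool.and_eq_true, beq_iff_eq] at hb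
      exact absurd hb.1.symm h2
    · intro hc
      exact absurd hc hne
  · obtain ⟨a2, b2, g2, hg2, hy2, hx2, hc2, he2⟩ := slope_decomp x1 y1 x2 y2 h2
    obtain ⟨a3, b3, g3, hg3, hy3, hx3, hc3, he3⟩ := slope_decomp x1 y1 x3 y3 h3
    have hb2 : b2 ≠ 0 := by
      intro h0; rw [h0, zero_mul] at hx2; exact (sub_ne_zero.mpr h2) hx2
    have hb3 : b3 ≠ 0 := by
      intro h0; rw [h0, zero_mul] at hx3; exact (sub_ne_zero.mpr h3) hx3
    unfold sameSlopeB
    rw [if_neg (by simp only [Bool.or_eq_true, beq_iff_eq]; omega)]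
    rw [he2, he3, norm_eq_iff a2 b2 a3 b3 hb2 hb3 hc2 hc3,
        ← cross_transfer a2 b2 a3 b3 g2 g3 _ _ _ _ hg2 hg3 hy2 hx2 hy3 hx3]
    simp [beq_iff_eq]

-- ---- B-side restatements ----
theorem innerK_eq (x1 y1 x2 y2 : Int) (t : List (Int × Int)) :
    innerK x1 y1 x2 y2 t =
      (t.length : Int) - (t.countP (fun r => calSlope1 x1 y1 r.1 r.2 == calSlope1 x1 y1 x2 y2) : Int) := by
  induction t with
  | nil => simp [innerK]
  | cons r t ih =>
    have hcnt : (t.countP (fun r => calSlope1 x1 y1 r.1 r.2 == calSlope1 x1 y1 x2 y2)) ≤ t.length :=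
      List.countP_le_length
    by_cases hs : sameSlopeB x1 y1 x2 y2 r.1 r.2 = true
    · have heq : (calSlope1 x1 y1 r.1 r.2 == calSlope1 x1 y1 x2 y2) = true := by
        simp only [beq_iff_eq]
        exact ((sameSlopeB_iff x1 y1 x2 y2 r.1 r.2).mp hs).symm
      simp only [innerK, List.countP_cons, heq, if_pos hs, List.length_cons, ih]
      push_cast
      ring
    · have heq : (calSlope1 x1 y1 r.1 r.2 == calSlope1 x1 y1 x2 y2) = false := by
        simp only [beq_eq_false_iff_ne, ne_eq]
        intro hc
        exact hs ((sameSlopeB_iff x1 y1 x2 y2 r.1 r.2).mpr hc.symm)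
      simp only [innerK, List.countP_cons, heq, if_neg hs, List.length_cons, ih]
      push_cast
      ring

theorem innerJ_eq (x1 y1 : Int) (t : List (Int × Int)) :
    innerJ x1 y1 t = pairsTot t - eqA x1 y1 t := by
  induction t with
  | nil => simp [innerJ, pairsTot, eqA]
  | cons q t ih =>
    simp only [innerJ, pairsTot, eqA, ih, innerK_eq]
    ring

-- ---- A-side: the slope counter computes eqA ----

theorem foldl_add_comb (l : List Int) (a : Int) :
    l.foldl (fun r c => r + pyComb c 2) a = a + (l.map (fun c => pyComb c 2)).sum := by
  induction l generalizing a with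
  | nil => simp
  | cons x t ih => simp [List.foldl_cons, ih]; ring

-- sum over a nodup list where the function changes at exactly one member
theorem sum_map_update {K : Type} (g g' : K → Int) (c : Int) :
    ∀ (l : List K), l.Nodup → ∀ s, s ∈ l → (∀ k, k ≠ s → g' k = g k) → g' s = g s + c →
      (l.map g').sum = (l.map g).sum + c := by
  intro l
  induction l with
  | nil => intro _ s hs; exact absurd hs List.not_mem_nil
  | cons h t ih =>
    intro hnd s hs hoth hself
    rcases List.mem_cons.mp hs with hh | ht
    · subst hh
      have hnot : s ∉ t := (List.nodup_cons.mp hnd).1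
      have hmap : t.map g' = t.map g :=
        List.map_congr_left (fun k hk => hoth k (fun hc => hnot (hc ▸ hk)))
      simp only [List.map_cons, List.sum_cons, hmap, hself]
      ring
    · have hh : h ≠ s := by
        intro hc; exact (List.nodup_cons.mp hnd).1 (hc ▸ ht)
      simp only [List.map_cons, List.sum_cons, hoth h hh,
        ih (List.nodup_cons.mp hnd).2 s ht hoth hself]
      ring

theorem ofList_perm_dedup (S : List (Int × Int)) : (PySem.Set.ofList S).Perm S.dedup := by
  apply List.perm_iff_count.mpr
  intro k
  by_cases hk : k ∈ S
  · rw [List.count_eq_one_of_mem (PySem.Set.nodup_ofList S) (by rw [PySem.Set.mem_ofList]; exact hk),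
        List.count_eq_one_of_mem (List.nodup_dedup S) (List.mem_dedup.mpr hk)]
  · rw [List.count_eq_zero_of_not_mem (by rw [PySem.Set.mem_ofList]; exact hk),
        List.count_eq_zero_of_not_mem (fun hc => hk (List.mem_dedup.mp hc))]

theorem sum_dedup_comb (S : List (Int × Int)) :
    (S.dedup.map (fun k => pyComb ((S.count k : Int)) 2)).sum = eqS S := by
  induction S with
  | nil => simp [eqS]
  | cons s t ih =>
    by_cases hmem : s ∈ t
    · rw [List.dedup_cons_of_mem hmem]
      unfold eqS
      rw [← ih]
      have hupd := sum_map_update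
        (g := fun k => pyComb ((t.count k : Int)) 2)
        (g' := fun k => pyComb (((s :: t).count k : Int)) 2)
        (c := (t.count s : Int)) t.dedup (List.nodup_dedup t) s (List.mem_dedup.mpr hmem)
        ?_ ?_
      · rw [hupd]; ring
      · intro k hk
        simp only [List.count_cons, beq_iff_eq]
        rw [if_neg (fun hc : s = k => hk hc.symm)]
        simp
      · simp only [List.count_cons_self]
        have h2 : ((2:Int)) = ((2:Nat) : Int) := by norm_num
        rw [h2, pyComb_natCast, pyComb_natCast]
        push_cast [Nat.choose_succ_succ, Nat.choose_one_right]
        ring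
    · rw [List.dedup_cons_of_notMem hmem]
      unfold eqS
      simp only [List.map_cons, List.sum_cons, List.count_cons_self,
        List.count_eq_zero_of_not_mem hmem]
      have hmap : t.dedup.map (fun k => pyComb (((s :: t).count k : Int)) 2)
          = t.dedup.map (fun k => pyComb ((t.count k : Int)) 2) := by
        apply List.map_congr_left
        intro k hk
        have hks : ¬ (k = s) := fun hc => hmem (hc ▸ List.mem_dedup.mp hk)
        simp only [List.count_cons, beq_iff_eq]
        rw [if_neg (fun hc : s = k => hks hc.symm)]
        simp
      rw [hmap, ih]
      simp [pyComb]

theorem eqS_map_eqA (x1 y1 : Int) (rest : List (Int × Int)) :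
    eqS (rest.map (fun p => calSlope1 x1 y1 p.1 p.2)) = eqA x1 y1 rest := by
  induction rest with
  | nil => rfl
  | cons q t ih =>
    simp only [List.map_cons, eqS, eqA, ih]
    congr 1
    simp [List.count, List.countP_map, Function.comp_def]

theorem anchorRes_eq (x1 y1 : Int) (rest : List (Int × Int)) :
    anchorRes x1 y1 rest = eqA x1 y1 rest := by
  unfold anchorRes
  have hfold : rest.foldl (fun d p => d.modify (calSlope1 x1 y1 p.1 p.2) 0 (· + 1)) PySem.Dict.empty
      = PySem.Dict.counter (rest.map (fun p => calSlope1 x1 y1 p.1 p.2)) := by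
    rw [PySem.Dict.counter_eq_foldl, List.foldl_map]
  rw [hfold, foldl_add_comb]
  have hvals : (PySem.Dict.counter (rest.map (fun p => calSlope1 x1 y1 p.1 p.2))).values
      = (PySem.Set.ofList (rest.map (fun p => calSlope1 x1 y1 p.1 p.2))).map
          (fun k => (((rest.map (fun p => calSlope1 x1 y1 p.1 p.2)).count k : Int))) := by
    simp only [PySem.Dict.values, PySem.Dict.items_counter, List.map_map]
    rfl
  rw [hvals, List.map_map]
  have hperm : (((PySem.Set.ofList (rest.map (fun p => calSlope1 x1 y1 p.1 p.2))).map
        ((fun c => pyComb c 2) ∘ fun k => (((rest.map (fun p => calSlope1 x1 y1 p.1 p.2)).count k : Int))))).sum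
      = (((rest.map (fun p => calSlope1 x1 y1 p.1 p.2)).dedup).map
          (fun k => pyComb (((rest.map (fun p => calSlope1 x1 y1 p.1 p.2)).count k : Int)) 2)).sum := by
    apply List.Perm.sum_eq
    have := (ofList_perm_dedup (rest.map (fun p => calSlope1 x1 y1 p.1 p.2))).map
      (fun k => pyComb (((rest.map (fun p => calSlope1 x1 y1 p.1 p.2)).count k : Int)) 2)
    simpa [Function.comp_def] using this
  rw [hperm, sum_dedup_comb, eqS_map_eqA]
  ring

-- ---- assembling ----
theorem alt_eq (pts : List (Int × Int)) : solve_alt pts = tripsTot pts - solveLoop pts := by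
  induction pts with
  | nil => simp [solve_alt, tripsTot, solveLoop]
  | cons p t ih =>
    simp only [solve_alt, tripsTot, solveLoop, ih, innerJ_eq, anchorRes_eq]
    ring

-- ===== VERDICT (by name: the statement is the Claim_ definition above) =====
theorem solve_spec : Claim_equal_solve := by
  intro points _
  unfold Spec_solve solve
  rw [alt_eq, comb3_eq]
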